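-- pv_equiv track=rewrite | github.com/alexisechano/Artificial-Intelligence-1 | csp/sudoku_part_1_Echano_A.py | check_thru_box
-- ===== SOURCE A (Python) =====
-- def find_thing(c, thing):   #finds number in whatever constrsint c (r or c or b)
--     for t in c:
--         if(thing in t):
--             return t
--     return []
--
-- def check_thru_box(csp, thing, a):
--     box = find_thing(csp, thing)
--     s = []
--     for b in box:
--         if(b in a and a[b] not in s):
--             s.append(a[b])
--         elif(b in a and a[b] in s):
--             return False
--     return True
-- ===== SOURCE B (Python) =====
-- def find_thing(c, thing):
--     for t in c:
--         if(thing in t):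
--             return t
--     return []
--
-- def check_thru_box(csp, thing, a):
--     box = find_thing(csp, thing)
--     vals = [a[b] for b in box if b in a]
--     return len(vals) == len(set(vals))
-- ===== Notes on version B (the rewrite author's own statement) =====
-- stated objective: simpler
-- what changed: Replaces A's incremental seen-list loop with early return by one comprehension gathering the box's assigned values followed by a single len(vals)==len(set(vals)) duplicate check.
import Mathlib
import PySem

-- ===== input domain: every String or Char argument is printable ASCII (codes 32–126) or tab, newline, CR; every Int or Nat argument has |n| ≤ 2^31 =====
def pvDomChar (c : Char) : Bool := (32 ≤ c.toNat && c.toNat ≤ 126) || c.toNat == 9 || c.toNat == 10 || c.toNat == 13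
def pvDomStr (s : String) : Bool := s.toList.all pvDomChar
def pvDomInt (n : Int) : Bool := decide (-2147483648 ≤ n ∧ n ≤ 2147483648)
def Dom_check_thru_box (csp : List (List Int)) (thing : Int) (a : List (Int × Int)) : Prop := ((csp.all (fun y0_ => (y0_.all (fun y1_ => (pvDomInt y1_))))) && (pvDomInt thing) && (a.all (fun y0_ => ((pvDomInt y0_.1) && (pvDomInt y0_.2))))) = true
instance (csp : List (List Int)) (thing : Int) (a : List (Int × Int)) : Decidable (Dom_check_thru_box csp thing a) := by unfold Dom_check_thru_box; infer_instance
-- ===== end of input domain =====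

-- B gathers the assigned values of the box in one pass and compares len(vals) with len(set(vals)),
-- replacing A's incremental seen-list with early return; objective: simpler (no speed claim).

-- ===== PORT A =====
-- find_thing: first row of csp containing thing, else []
def find_thing (c : List (List Int)) (thing : Int) : List Int :=
  match c with
  | [] => []
  | t :: rest => if t.contains thing then t else find_thing rest thing

-- A's loop over box with seen-list s and early return False
def check_thru_box_loop (a : List (Int × Int)) (box : List Int) (s : List Int) : Bool :=
  match box with
  | [] => true
  | b :: rest =>
    match (PySem.Dict.mk a).get? b with           -- 'b in a' and 'a[b]'
    | none => check_thru_box_loop a rest s        -- b not assigned: skip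
    | some v =>
      if s.contains v then false                  -- elif branch: duplicate → False
      else check_thru_box_loop a rest (s ++ [v])  -- s.append(a[b])

def check_thru_box (csp : List (List Int)) (thing : Int) (a : List (Int × Int)) : Bool :=
  let box := find_thing csp thing
  check_thru_box_loop a box []

-- ===== PORT B =====
def find_thing_alt (c : List (List Int)) (thing : Int) : List Int :=
  match c with
  | [] => []
  | t :: rest => if t.contains thing then t else find_thing_alt rest thing

def check_thru_box_alt (csp : List (List Int)) (thing : Int) (a : List (Int × Int)) : Bool :=
  let box := find_thing_alt csp thing
  let vals := box.filterMap (fun b => (PySem.Dict.mk a).get? b)   -- [a[b] for b in box if b in a]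
  vals.length == (PySem.Set.ofList vals).length                   -- len(vals) == len(set(vals))

-- ===== PRECONDITION & SPEC =====
def Spec_check_thru_box (csp : List (List Int)) (thing : Int) (a : List (Int × Int)) (out : Bool) : Prop := out = check_thru_box_alt csp thing a
instance (csp : List (List Int)) (thing : Int) (a : List (Int × Int)) (out : Bool) : Decidable (Spec_check_thru_box csp thing a out) := by unfold Spec_check_thru_box; infer_instance

-- ===== CLAIM (what is proved, stated in full; the proofs are below) =====
def Claim_equal_check_thru_box : Prop := ∀ (csp : List (List Int)) (thing : Int) (a : List (Int × Int)), Dom_check_thru_box csp thing a → Spec_check_thru_box csp thing a (check_thru_box csp thing a)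

-- ===== LEMMAS AND PROOFS =====

theorem find_thing_eq_alt (c : List (List Int)) (thing : Int) :
    find_thing c thing = find_thing_alt c thing := by
  induction c with
  | nil => rfl
  | cons t rest ih => simp [find_thing, find_thing_alt, ih]

-- A's loop returns true iff the seen-list extended with the remaining assigned values stays duplicate-free
theorem check_thru_box_loop_iff (a : List (Int × Int)) (box : List Int) :
    ∀ s : List Int, s.Nodup →
      (check_thru_box_loop a box s = true ↔
        (s ++ box.filterMap (fun b => (PySem.Dict.mk a).get? b)).Nodup) := by
  induction box with
  | nil => intro s hs; simpa [check_thru_box_loop]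
  | cons b rest ih =>
    intro s hs
    simp only [check_thru_box_loop, List.filterMap_cons]
    cases hb : (PySem.Dict.mk a).get? b with
    | none => exact ih s hs
    | some v =>
      by_cases hv : v ∈ s
      · simp only [List.contains_eq_mem, hv, decide_true, if_true]
        constructor
        · intro h; cases h
        · intro h
          exfalso
          have : v ∉ s := by
            have := h.disjoint
            intro hmem
            exact this hmem (by simp)
          exact this hv
      · simp only [List.contains_eq_mem, hv, decide_false, Bool.false_eq_true, if_false]
        have hs' : (s ++ [v]).Nodup := by
          simp only [List.nodup_append, hs, true_and]
          exact ⟨List.nodup_singleton v, fun x hx b hb => by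
            simp only [List.mem_singleton] at hb; exact fun h => hv (hb ▸ h ▸ hx)⟩
        rw [ih (s ++ [v]) hs']
        simp [List.append_assoc]

-- len(vals) == len(set(vals)) is exactly the duplicate-free test
theorem alt_test_iff (vals : List Int) :
    (vals.length == (PySem.Set.ofList vals).length) = true ↔ vals.Nodup := by
  have hlen : (PySem.Set.ofList vals).length = vals.dedup.length := by
    exact List.Perm.length_eq
      ((List.perm_ext_iff_of_nodup (PySem.Set.nodup_ofList vals) vals.nodup_dedup).mpr
        (by intro x; simp [PySem.Set.mem_ofList, List.mem_dedup]))
  rw [beq_iff_eq, hlen]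
  constructor
  · intro h
    have hsub : List.Sublist vals.dedup vals := List.dedup_sublist vals
    have := hsub.eq_of_length h.symm
    rw [← this]; exact vals.nodup_dedup
  · intro h; rw [List.dedup_eq_self.mpr h]

-- ===== VERDICT (by name: the statement is the Claim_ definition above) =====
theorem check_thru_box_spec : Claim_equal_check_thru_box := by
  intro csp thing a _
  unfold Spec_check_thru_box check_thru_box check_thru_box_alt
  rw [← find_thing_eq_alt]
  have hA := check_thru_box_loop_iff a (find_thing csp thing) [] (by simp)
  have hB := alt_test_iff ((find_thing csp thing).filterMap (fun b => (PySem.Dict.mk a).get? b))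
  simp only [List.nil_append] at hA
  exact Bool.eq_iff_iff.mpr (hA.trans hB.symm)
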